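-- pv_equiv track=rewrite | github.com/LachlanRidley/aoc-2024-python | day9.py | size_of_file
-- ===== SOURCE A (Python) =====
-- def size_of_file(mem, id):
--     i = 0
--     while i < len(mem) and str(mem[i]) != str(id):
--         i += 1
--     size = 0
--     while i < len(mem) and str(mem[i]) == str(id):
--         size += 1
--         i += 1
--     return size
-- ===== SOURCE B (Python) =====
-- def _runs(mem):
--     """Run-length encode mem into a list of (value, run_length) pairs."""
--     runs = []
--     for x in mem:
--         if runs and runs[-1][0] == x:
--             runs[-1] = (x, runs[-1][1] + 1)
--         else:
--             runs.append((x, 1))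
--     return runs
--
--
-- def size_of_file(mem, id):
--     for key, n in _runs(mem):
--         if key == id:
--             return n
--     return 0
-- ===== Notes on version B (the rewrite author's own statement) =====
-- stated objective: alternative
-- what changed: Replaces A's two index-based while loops (skip until id, then count) with a run-length encoding pass over mem followed by a lookup of the first run whose key equals id; B also compares ints directly instead of via str() on every element.
import Mathlib
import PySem

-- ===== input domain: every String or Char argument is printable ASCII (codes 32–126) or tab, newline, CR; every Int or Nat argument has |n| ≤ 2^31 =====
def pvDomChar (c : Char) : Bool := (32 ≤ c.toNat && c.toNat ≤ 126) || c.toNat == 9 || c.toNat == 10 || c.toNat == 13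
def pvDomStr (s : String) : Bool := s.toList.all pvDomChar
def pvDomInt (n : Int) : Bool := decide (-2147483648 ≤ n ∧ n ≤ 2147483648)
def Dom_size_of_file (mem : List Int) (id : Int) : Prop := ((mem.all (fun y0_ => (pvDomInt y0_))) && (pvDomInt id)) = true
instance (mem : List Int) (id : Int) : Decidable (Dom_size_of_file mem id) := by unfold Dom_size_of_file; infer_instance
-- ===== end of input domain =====

-- B replaces A's two index-based while loops (skip, then count) with a run-length
-- encoding pass followed by a lookup of the first run keyed by id (objective: alternative).

-- ===== PORT A =====
-- first while loop: advance i while i < len(mem) and str(mem[i]) != str(id)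
def sofSkip (mem : List Int) (id : Int) (i : Nat) : Nat :=
  if h : i < mem.length then
    if PySem.Int.toStr mem[i] ≠ PySem.Int.toStr id then sofSkip mem id (i + 1) else i
  else i
termination_by mem.length - i

-- second while loop: count while i < len(mem) and str(mem[i]) == str(id)
def sofCount (mem : List Int) (id : Int) (i : Nat) (size : Int) : Int :=
  if h : i < mem.length then
    if PySem.Int.toStr mem[i] = PySem.Int.toStr id then sofCount mem id (i + 1) (size + 1) else size
  else size
termination_by mem.length - i

def size_of_file (mem : List Int) (id : Int) : Int :=
  sofCount mem id (sofSkip mem id 0) 0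

-- ===== PORT B =====
-- one step of the run-building loop in _runs: merge into the last run or append a new one
def addRun (runs : List (Int × Int)) (x : Int) : List (Int × Int) :=
  match runs.getLast? with
  | some (k, n) => if k = x then runs.dropLast ++ [(x, n + 1)] else runs ++ [(x, 1)]
  | none => [(x, 1)]

-- the 'for key, n in _runs(mem): if key == id: return n' loop
def findRun (runs : List (Int × Int)) (id : Int) : Int :=
  match runs with
  | [] => 0
  | (k, n) :: rest => if k = id then n else findRun rest id

def size_of_file_alt (mem : List Int) (id : Int) : Int :=
  findRun (mem.foldl addRun []) id

-- ===== PRECONDITION & SPEC =====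
def Spec_size_of_file (mem : List Int) (id : Int) (out : Int) : Prop := out = size_of_file_alt mem id
instance (mem : List Int) (id : Int) (out : Int) : Decidable (Spec_size_of_file mem id out) := by unfold Spec_size_of_file; infer_instance

-- ===== CLAIM (what is proved, stated in full; the proofs are below) =====
def Claim_equal_size_of_file : Prop := ∀ (mem : List Int) (id : Int), Dom_size_of_file mem id → Spec_size_of_file mem id (size_of_file mem id)

-- ===== LEMMAS AND PROOFS =====

/- str(n) is injective on ints: first, Nat.toDigits 10 in terms of Nat.digits. -/

theorem pv_toDigitsCore_eq (n : Nat) (hn : 0 < n) :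
    ∀ (f : Nat) (l : List Char), n ≤ f →
      Nat.toDigitsCore 10 f n l = ((Nat.digits 10 n).map Nat.digitChar).reverse ++ l := by
  induction n using Nat.strong_induction_on with
  | _ n ih =>
    intro f l hf
    obtain ⟨f', rfl⟩ : ∃ f', f = f' + 1 := ⟨f - 1, by omega⟩
    rw [Nat.toDigitsCore]
    rw [Nat.digits_def' (by norm_num : 1 < 10) hn]
    by_cases h10 : n / 10 = 0
    · simp [h10, Nat.digits_zero]
    · have hlt : n / 10 < n := Nat.div_lt_self hn (by norm_num)
      have := ih (n / 10) hlt (Nat.pos_of_ne_zero h10) f' (Nat.digitChar (n % 10) :: l) (by omega)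
      simp only [h10, this]
      rw [Nat.digits_def' (by norm_num : 1 < 10) (Nat.pos_of_ne_zero h10)] at *
      simp [List.map_cons, List.reverse_cons]

theorem pv_toDigits10 (n : Nat) :
    Nat.toDigits 10 n = if n = 0 then ['0'] else ((Nat.digits 10 n).map Nat.digitChar).reverse := by
  by_cases h : n = 0
  · subst h; rfl
  · rw [if_neg h]
    have := pv_toDigitsCore_eq n (Nat.pos_of_ne_zero h) (n + 1) [] (by omega)
    simpa [Nat.toDigits] using this

theorem pv_digitChar_inj (a b : Nat) (ha : a < 10) (hb : b < 10)
    (h : Nat.digitChar a = Nat.digitChar b) : a = b := by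
  interval_cases a <;> interval_cases b <;> revert h <;> decide

theorem pv_digitChar_ne_dash (a : Nat) (ha : a < 10) : Nat.digitChar a ≠ '-' := by
  interval_cases a <;> decide

theorem pv_map_digitChar_inj :
    ∀ (l₁ l₂ : List Nat), (∀ x ∈ l₁, x < 10) → (∀ x ∈ l₂, x < 10) →
      l₁.map Nat.digitChar = l₂.map Nat.digitChar → l₁ = l₂ := by
  intro l₁
  induction l₁ with
  | nil => intro l₂ _ _ h; cases l₂ <;> simp_all
  | cons a t ih =>
    intro l₂ h1 h2 h
    cases l₂ with
    | nil => simp at h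
    | cons b t' =>
      simp only [List.map_cons, List.cons.injEq] at h
      have hab := pv_digitChar_inj a b (h1 a (by simp)) (h2 b (by simp)) h.1
      have := ih t' (fun x hx => h1 x (by simp [hx])) (fun x hx => h2 x (by simp [hx])) h.2
      simp [hab, this]

theorem pv_dash_not_mem_toDigits (n : Nat) : '-' ∉ Nat.toDigits 10 n := by
  rw [pv_toDigits10]
  by_cases h : n = 0
  · simp [h]
  · rw [if_neg h]
    intro hmem
    rw [List.mem_reverse, List.mem_map] at hmem
    obtain ⟨d, hd, hdc⟩ := hmem
    exact pv_digitChar_ne_dash d (Nat.digits_lt_base (by norm_num) hd) hdc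

theorem pv_toDigits_inj (m n : Nat) (h : Nat.toDigits 10 m = Nat.toDigits 10 n) : m = n := by
  rw [pv_toDigits10, pv_toDigits10] at h
  by_cases hm : m = 0 <;> by_cases hn : n = 0
  · omega
  · rw [if_pos hm, if_neg hn] at h
    exfalso
    have : '-' ≠ '0' := by decide
    have h0 : (Nat.digits 10 n).map Nat.digitChar = ['0'] := by
      have := congrArg List.reverse h
      simpa using this.symm
    have : Nat.digits 10 n = [0] := by
      have := pv_map_digitChar_inj (Nat.digits 10 n) [0]
        (fun x hx => Nat.digits_lt_base (by norm_num) hx) (by simp) (by simpa using h0)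
      exact this
    have := Nat.ofDigits_digits 10 n
    rw [this.symm] at hn
    simp [‹Nat.digits 10 n = [0]›] at hn
  · rw [if_neg hm, if_pos hn] at h
    exfalso
    have h0 : (Nat.digits 10 m).map Nat.digitChar = ['0'] := by
      have := congrArg List.reverse h
      simpa using this
    have : Nat.digits 10 m = [0] := by
      exact pv_map_digitChar_inj (Nat.digits 10 m) [0]
        (fun x hx => Nat.digits_lt_base (by norm_num) hx) (by simp) (by simpa using h0)
    have := Nat.ofDigits_digits 10 m
    rw [this.symm] at hm
    simp [‹Nat.digits 10 m = [0]›] at hm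
  · rw [if_neg hm, if_neg hn] at h
    have h' : (Nat.digits 10 m).map Nat.digitChar = (Nat.digits 10 n).map Nat.digitChar := by
      have := congrArg List.reverse h
      simpa using this
    have hd := pv_map_digitChar_inj _ _
      (fun x hx => Nat.digits_lt_base (by norm_num) hx)
      (fun x hx => Nat.digits_lt_base (by norm_num) hx) h'
    have h1 := Nat.ofDigits_digits 10 m
    have h2 := Nat.ofDigits_digits 10 n
    rw [← h1, ← h2, hd]

theorem pv_toStr_inj (a b : Int) (h : PySem.Int.toStr a = PySem.Int.toStr b) : a = b := by
  have hc : PySem.Int.toChars a = PySem.Int.toChars b := by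
    rw [← PySem.Int.toList_toStr, ← PySem.Int.toList_toStr, h]
  unfold PySem.Int.toChars at hc
  split_ifs at hc with h1 h2 h2
  · simp only [List.cons.injEq] at hc
    have := pv_toDigits_inj _ _ hc.2
    omega
  · exfalso
    have : '-' ∈ Nat.toDigits 10 b.toNat := by rw [← hc]; simp
    exact pv_dash_not_mem_toDigits _ this
  · exfalso
    have : '-' ∈ Nat.toDigits 10 a.toNat := by rw [hc]; simp
    exact pv_dash_not_mem_toDigits _ this
  · have := pv_toDigits_inj _ _ hc
    omega

/- the common specification: length of the first run of id -/

-- number of leading elements of l equal to k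
def pvTCount (k : Int) : List Int → Int
  | [] => 0
  | x :: xs => if x = k then 1 + pvTCount k xs else 0

-- skip until the first id, then 1 + leading count
def pvCountRun (l : List Int) (id : Int) : Int :=
  match l with
  | [] => 0
  | x :: xs => if x = id then 1 + pvTCount x xs else pvCountRun xs id

/- A-side: the two while loops compute pvCountRun -/

theorem pv_sofCount_eq (mem : List Int) (id : Int) (i : Nat) (size : Int) :
    sofCount mem id i size = size + pvTCount id (mem.drop i) := by
  generalize hk : mem.length - i = k
  induction k generalizing i size with
  | zero =>
    have hge : mem.length ≤ i := by omega
    rw [sofCount, dif_neg (by omega), List.drop_of_length_le hge]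
    simp [pvTCount]
  | succ k ih =>
    have hlt : i < mem.length := by omega
    rw [List.drop_eq_getElem_cons hlt, sofCount, dif_pos hlt]
    by_cases hc : PySem.Int.toStr mem[i] = PySem.Int.toStr id
    · have he : mem[i] = id := pv_toStr_inj _ _ hc
      rw [if_pos hc, ih (i + 1) (size + 1) (by omega)]
      simp only [pvTCount, if_pos he]
      ring
    · have hne : ¬ mem[i] = id := fun h => hc (by rw [h])
      rw [if_neg hc]
      simp [pvTCount, hne]

theorem pv_skip_count_eq (mem : List Int) (id : Int) (i : Nat) :
    sofCount mem id (sofSkip mem id i) 0 = pvCountRun (mem.drop i) id := by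
  generalize hk : mem.length - i = k
  induction k generalizing i with
  | zero =>
    have hge : mem.length ≤ i := by omega
    rw [sofSkip, dif_neg (by omega), sofCount, dif_neg (by omega), List.drop_of_length_le hge]
    rfl
  | succ k ih =>
    have hlt : i < mem.length := by omega
    rw [List.drop_eq_getElem_cons hlt, sofSkip, dif_pos hlt]
    by_cases hc : PySem.Int.toStr mem[i] = PySem.Int.toStr id
    · have he : mem[i] = id := pv_toStr_inj _ _ hc
      rw [if_neg (by simpa using hc)]
      rw [sofCount, dif_pos hlt, if_pos hc, pv_sofCount_eq]
      simp only [pvCountRun, he]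
      simp only [if_true]
      ring_nf
    · have hne : ¬ mem[i] = id := fun h => hc (by rw [h])
      rw [if_pos (by simpa using hc), ih (i + 1) (by omega)]
      simp [pvCountRun, hne]

/- B-side: foldl addRun computes the run-length encoding -/

def pvRleFrom (k : Int) (n : Int) : List Int → List (Int × Int)
  | [] => [(k, n)]
  | x :: xs => if x = k then pvRleFrom k (n + 1) xs else (k, n) :: pvRleFrom x 1 xs

theorem pv_foldl_addRun (l : List Int) :
    ∀ (acc : List (Int × Int)) (k n : Int),
      l.foldl addRun (acc ++ [(k, n)]) = acc ++ pvRleFrom k n l := by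
  induction l with
  | nil => intro acc k n; simp [pvRleFrom]
  | cons x xs ih =>
    intro acc k n
    rw [List.foldl_cons]
    have hlast : (acc ++ [(k, n)]).getLast? = some (k, n) := by
      simp
    by_cases hkx : k = x
    · have : addRun (acc ++ [(k, n)]) x = acc ++ [(x, n + 1)] := by
        rw [addRun, hlast]; simp [hkx]
      rw [this, ih acc x (n + 1)]
      simp [pvRleFrom, hkx.symm]
    · have : addRun (acc ++ [(k, n)]) x = (acc ++ [(k, n)]) ++ [(x, 1)] := by
        rw [addRun, hlast]; simp [hkx]
      rw [this, ih (acc ++ [(k, n)]) x 1]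
      have hxk : ¬ x = k := fun h => hkx h.symm
      simp [pvRleFrom, hxk]

theorem pv_findRun_rleFrom (id : Int) (l : List Int) :
    ∀ (k n : Int), findRun (pvRleFrom k n l) id =
      if k = id then n + pvTCount k l else pvCountRun l id := by
  induction l with
  | nil => intro k n; simp [pvRleFrom, findRun, pvTCount, pvCountRun]
  | cons x xs ih =>
    intro k n
    by_cases hxk : x = k
    · subst hxk
      rw [pvRleFrom, if_pos rfl, ih x (n + 1)]
      by_cases hki : x = id
      · rw [if_pos hki, if_pos hki]
        simp [pvTCount]
        ring_nf
      · rw [if_neg hki, if_neg hki]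
        simp [pvCountRun, hki]
    · rw [pvRleFrom, if_neg hxk, findRun]
      by_cases hki : k = id
      · rw [if_pos hki, if_pos hki]
        simp [pvTCount, hxk]
      · rw [if_neg hki, if_neg hki, ih x 1]
        simp [pvCountRun]

theorem pv_alt_eq (mem : List Int) (id : Int) : size_of_file_alt mem id = pvCountRun mem id := by
  cases mem with
  | nil => rfl
  | cons x xs =>
    unfold size_of_file_alt
    rw [List.foldl_cons]
    have h0 : addRun [] x = [] ++ [(x, 1)] := by rfl
    rw [h0, pv_foldl_addRun xs [] x 1, List.nil_append, pv_findRun_rleFrom]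
    by_cases hxi : x = id
    · simp [pvCountRun, hxi]
    · simp [pvCountRun, hxi]

theorem pv_a_eq (mem : List Int) (id : Int) : size_of_file mem id = pvCountRun mem id := by
  unfold size_of_file
  rw [pv_skip_count_eq mem id 0, List.drop_zero]

-- ===== VERDICT (by name: the statement is the Claim_ definition above) =====
theorem size_of_file_spec : Claim_equal_size_of_file := by
  intro mem id _
  unfold Spec_size_of_file
  rw [pv_a_eq, pv_alt_eq]
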